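-- pv_equiv track=rewrite | github.com/V-SANT/TDA_2024_1C | TP3/gd.py | p_opt_tribu_agua_gd
-- ===== SOURCE A (Python) =====
-- def insertar_ordenado(grupos, grupo_minimo):
--     def valor_cuadrado(grupo):
--         return grupo[1]**2
--
--     def busqueda_binaria(grupos, grupo_minimo):
--         valor_minimo = valor_cuadrado(grupo_minimo)
--         izquierda, derecha = 0, len(grupos)
--         while izquierda < derecha:
--             medio = (izquierda + derecha) // 2
--             if valor_cuadrado(grupos[medio]) < valor_minimo:
--                 izquierda = medio + 1
--             else:
--                 derecha = medio
--         return izquierda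
--
--     posicion = busqueda_binaria(grupos, grupo_minimo)
--     grupos.insert(posicion, grupo_minimo)
--
--     return grupos
--
-- def p_opt_tribu_agua_gd(maestros, habilidades, k):
--     tuplas_maestros = list(zip(maestros, habilidades))
--     maestros_ordenados = sorted(tuplas_maestros, key=lambda x: x[1], reverse=True)
--     grupos = [([], 0) for _ in range(k)]
--
--     for maestro in maestros_ordenados:
--         grupo_minimo = grupos.pop(0)
--         nuevo_valor = grupo_minimo[1] + maestro[1]
--         maestros_grupo = grupo_minimo[0] + [maestro[0]]
--         grupo_minimo = (maestros_grupo, nuevo_valor)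
--
--         grupos = insertar_ordenado(grupos, grupo_minimo)
--
--     grupos_finales = [x[0] for x in grupos]
--     coeficiente = sum(x[1]**2 for x in grupos)
--
--     return grupos_finales, coeficiente
-- ===== SOURCE B (Python) =====
-- def p_opt_tribu_agua_gd(maestros, habilidades, k):
--     pares = sorted(zip(maestros, habilidades), key=lambda x: x[1], reverse=True)
--     bolsa = [([], 0) for _ in range(k)]
--     for nombre, hab in pares:
--         mejor = bolsa[0]
--         for g in bolsa[1:]:
--             if g[1] ** 2 < mejor[1] ** 2:
--                 mejor = g
--         bolsa.remove(mejor)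
--         bolsa.insert(0, (mejor[0] + [nombre], mejor[1] + hab))
--     ordenada = sorted(bolsa, key=lambda x: x[1] ** 2)
--     return [g[0] for g in ordenada], sum(g[1] ** 2 for g in ordenada)
-- ===== Notes on version B (the rewrite author's own statement) =====
-- stated objective: alternative
-- what changed: A maintains the groups as a list kept sorted by squared value via pop(0) plus hand-written binary-search insertion; B keeps an unsorted newest-first bag, picks the target group by a linear first-minimum scan, and sorts once at the end with a single stable sorted() call.
import Mathlib
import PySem

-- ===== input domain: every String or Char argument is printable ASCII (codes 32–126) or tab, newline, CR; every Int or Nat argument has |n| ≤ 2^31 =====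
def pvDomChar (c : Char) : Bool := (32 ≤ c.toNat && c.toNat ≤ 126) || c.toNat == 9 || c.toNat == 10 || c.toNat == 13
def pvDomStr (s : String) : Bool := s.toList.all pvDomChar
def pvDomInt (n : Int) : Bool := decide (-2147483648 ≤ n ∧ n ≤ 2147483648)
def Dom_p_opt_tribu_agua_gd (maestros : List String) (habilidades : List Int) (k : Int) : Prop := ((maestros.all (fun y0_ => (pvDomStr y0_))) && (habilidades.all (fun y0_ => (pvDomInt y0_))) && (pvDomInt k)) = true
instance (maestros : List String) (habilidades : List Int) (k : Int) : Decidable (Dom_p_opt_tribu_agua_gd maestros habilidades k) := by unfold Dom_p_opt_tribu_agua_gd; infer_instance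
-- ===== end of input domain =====

-- B replaces A's sorted group list (pop(0) + binary-search insertion) by an unsorted newest-first
-- bag with a linear first-minimum scan and ONE final stable sort; an alternative of similar cost.

-- ===== PORT A =====
def pvValorCuadrado (grupo : List String × Int) : Int := grupo.2 ^ 2

-- A's hand-written while-loop binary search (bisect_left on the squared value); indices are the
-- Python loop's nonnegative ints; grupos[medio] is always in range here (izquierda < derecha ≤ len),
-- where pyGetD equals Python's grupos[medio] exactly.
def pvBusquedaBinaria (grupos : List (List String × Int)) (valorMinimo : Int)
    (izquierda derecha : Nat) : Nat :=
  if h : izquierda < derecha then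
    let medio := (izquierda + derecha) / 2
    if pvValorCuadrado (PySem.List.pyGetD grupos (medio : Int) ([], 0)) < valorMinimo then
      pvBusquedaBinaria grupos valorMinimo (medio + 1) derecha
    else
      pvBusquedaBinaria grupos valorMinimo izquierda medio
  else izquierda
termination_by derecha - izquierda
decreasing_by
  · have h1 : izquierda ≤ (izquierda + derecha) / 2 := by omega
    have h2 : (izquierda + derecha) / 2 < derecha := by omega
    omega
  · have h1 : izquierda ≤ (izquierda + derecha) / 2 := by omega
    have h2 : (izquierda + derecha) / 2 < derecha := by omega
    omega

def pvInsertarOrdenado (grupos : List (List String × Int)) (grupoMinimo : List String × Int) :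
    List (List String × Int) :=
  let posicion := pvBusquedaBinaria grupos (pvValorCuadrado grupoMinimo) 0 grupos.length
  PySem.List.insert grupos (posicion : Int) grupoMinimo

-- the body of A's for-loop; 'none' = the IndexError of grupos.pop(0) on an empty list
def pvPasoA (st : Option (List (List String × Int))) (maestro : String × Int) :
    Option (List (List String × Int)) :=
  match st with
  | none => none
  | some grupos =>
    match grupos with
    | [] => none
    | grupoMinimo :: resto =>
      some (pvInsertarOrdenado resto (grupoMinimo.1 ++ [maestro.1], grupoMinimo.2 + maestro.2))

def p_opt_tribu_agua_gd (maestros : List String) (habilidades : List Int) (k : Int) :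
    List (List String) × Int :=
  let tuplasMaestros := List.zip maestros habilidades
  let maestrosOrdenados := PySem.List.sorted tuplasMaestros (fun x => x.2) true
  let gruposIniciales : List (List String × Int) := (PySem.List.pyRange 0 k 1).map (fun _ => ([], 0))
  match maestrosOrdenados.foldl pvPasoA (some gruposIniciales) with
  | some grupos => (grupos.map (fun x => x.1), (grupos.map (fun x => x.2 ^ 2)).sum)
  | none => ([], 0)

-- ===== PORT B =====
-- B's linear scan for the first group of minimal squared value (mejor = bolsa[0]; for g in bolsa[1:]: …)
def pvMejor (b0 : List String × Int) (resto : List (List String × Int)) : List String × Int :=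
  resto.foldl (fun mejor g => if g.2 ^ 2 < mejor.2 ^ 2 then g else mejor) b0

-- the body of B's for-loop; 'none' = the IndexError of bolsa[0] on an empty bag
def pvPasoB (st : Option (List (List String × Int))) (par : String × Int) :
    Option (List (List String × Int)) :=
  match st with
  | none => none
  | some bolsa =>
    match bolsa with
    | [] => none
    | b0 :: _ =>
      let mejor := pvMejor b0 (PySem.List.slice bolsa (some 1) none)
      match PySem.List.remove? bolsa mejor with
      | none => none
      | some resto => some ((mejor.1 ++ [par.1], mejor.2 + par.2) :: resto)

def p_opt_tribu_agua_gd_alt (maestros : List String) (habilidades : List Int) (k : Int) :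
    List (List String) × Int :=
  let pares := PySem.List.sorted (List.zip maestros habilidades) (fun x => x.2) true
  let bolsaInicial : List (List String × Int) := (PySem.List.pyRange 0 k 1).map (fun _ => ([], 0))
  match pares.foldl pvPasoB (some bolsaInicial) with
  | some bolsa =>
    let ordenada := PySem.List.sorted bolsa (fun g => g.2 ^ 2) false
    (ordenada.map (fun g => g.1), (ordenada.map (fun g => g.2 ^ 2)).sum)
  | none => ([], 0)

-- ===== PRECONDITION & SPEC =====
-- Pre_ excludes exactly the inputs where Python A raises IndexError (grupos.pop(0) on an empty
-- group list): k < 1 while zip(maestros, habilidades) is nonempty.  B raises there too.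
def Pre_p_opt_tribu_agua_gd (maestros : List String) (habilidades : List Int) (k : Int) : Prop :=
  1 ≤ k ∨ maestros = [] ∨ habilidades = []
instance (maestros : List String) (habilidades : List Int) (k : Int) :
    Decidable (Pre_p_opt_tribu_agua_gd maestros habilidades k) := by
  unfold Pre_p_opt_tribu_agua_gd; infer_instance

def pvWitness_p_opt_tribu_agua_gd : List String × List Int × Int := (["ana", "bo", "cai"], [3, -1, 2], 2)

def Spec_p_opt_tribu_agua_gd (maestros : List String) (habilidades : List Int) (k : Int)
    (out : List (List String) × Int) : Prop := out = p_opt_tribu_agua_gd_alt maestros habilidades k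
instance (maestros : List String) (habilidades : List Int) (k : Int) (out : List (List String) × Int) :
    Decidable (Spec_p_opt_tribu_agua_gd maestros habilidades k out) := by
  unfold Spec_p_opt_tribu_agua_gd; infer_instance

-- ===== CLAIM (what is proved, stated in full; the proofs are below) =====
def Claim_equal_p_opt_tribu_agua_gd : Prop := ∀ (maestros : List String) (habilidades : List Int) (k : Int), Dom_p_opt_tribu_agua_gd maestros habilidades k → Pre_p_opt_tribu_agua_gd maestros habilidades k → Spec_p_opt_tribu_agua_gd maestros habilidades k (p_opt_tribu_agua_gd maestros habilidades k)

-- ===== LEMMAS AND PROOFS =====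
-- Ghost-tagged simulation: each group carries an Int tag; along B's bag the tags strictly
-- increase (newest group = smallest tag), and A's list is the pvLexLe-sorted arrangement
-- (squared value first, tag second) of the same tagged multiset.

def pvLexLe (x y : (List String × Int) × Int) : Prop :=
  x.1.2 ^ 2 < y.1.2 ^ 2 ∨ (x.1.2 ^ 2 = y.1.2 ^ 2 ∧ x.2 ≤ y.2)

def pvTagLt (x y : (List String × Int) × Int) : Prop := x.2 < y.2

def pvInv (A B : List (List String × Int)) : Prop :=
  ∃ T S : List ((List String × Int) × Int),
    B = T.map Prod.fst ∧ A = S.map Prod.fst ∧ S.Perm T ∧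
    S.Pairwise pvLexLe ∧ T.Pairwise pvTagLt

theorem pv_tag_inj {T : List ((List String × Int) × Int)} (hT : T.Pairwise pvTagLt)
    {a b : (List String × Int) × Int} (ha : a ∈ T) (hb : b ∈ T) (h : a.2 = b.2) : a = b := by
  induction T with
  | nil => cases ha
  | cons x t ih =>
    rcases List.pairwise_cons.mp hT with ⟨hx, ht⟩
    rcases List.mem_cons.mp ha with rfl | ha' <;> rcases List.mem_cons.mp hb with rfl | hb'
    · rfl
    · have := hx _ hb'; unfold pvTagLt at this; omega
    · have := hx _ ha'; unfold pvTagLt at this; omega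
    · exact ih ht ha' hb'

theorem pv_fm (T : List ((List String × Int) × Int)) (a : (List String × Int) × Int)
    (hT : (a :: T).Pairwise pvTagLt) :
    ∃ P mt Q, a :: T = P ++ mt :: Q ∧ mt.1 = pvMejor a.1 (T.map Prod.fst) ∧
      (∀ x ∈ P, mt.1.2 ^ 2 < x.1.2 ^ 2) ∧ (∀ x ∈ Q, mt.1.2 ^ 2 ≤ x.1.2 ^ 2) := by
  induction T generalizing a with
  | nil =>
    exact ⟨[], a, [], rfl, rfl, by simp, by simp⟩
  | cons g T' ih =>
    rcases List.pairwise_cons.mp hT with ⟨ha, hrest⟩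
    rcases List.pairwise_cons.mp hrest with ⟨hg, hT'⟩
    by_cases hcmp : (g.1.2 : Int) ^ 2 < a.1.2 ^ 2
    · rcases ih g hrest with ⟨P', mt, Q', hdec, hmt, hP', hQ'⟩
      refine ⟨a :: P', mt, Q', by rw [List.cons_append, ← hdec], ?_, ?_, hQ'⟩
      · rw [hmt]; unfold pvMejor
        simp only [List.map_cons, List.foldl_cons, if_pos hcmp]
      · intro x hx
        rcases List.mem_cons.mp hx with rfl | hx'
        · have hgmem : g ∈ P' ++ mt :: Q' := by
            rw [← hdec]; exact List.mem_cons_self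
          have hle : mt.1.2 ^ 2 ≤ g.1.2 ^ 2 := by
            rcases List.mem_append.mp hgmem with h1 | h1
            · exact le_of_lt (hP' _ h1)
            · rcases List.mem_cons.mp h1 with rfl | h1
              · exact le_refl _
              · exact hQ' _ h1
          exact lt_of_le_of_lt hle hcmp
        · exact hP' _ hx'
    · have hpair : (a :: T').Pairwise pvTagLt :=
        List.pairwise_cons.mpr ⟨fun y hy => ha y (List.mem_cons_of_mem g hy), hT'⟩
      rcases ih a hpair with ⟨P', mt, Q', hdec, hmt, hP', hQ'⟩
      have hmejor : pvMejor a.1 ((g :: T').map Prod.fst) = pvMejor a.1 (T'.map Prod.fst) := by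
        unfold pvMejor
        simp only [List.map_cons, List.foldl_cons, if_neg hcmp]
      cases P' with
      | nil =>
        have h1 : a = mt ∧ T' = Q' := by
          simpa using hdec
        obtain ⟨rfl, rfl⟩ := h1
        refine ⟨[], a, g :: T', rfl, by rw [hmejor, ← hmt], by simp, ?_⟩
        intro x hx
        rcases List.mem_cons.mp hx with rfl | hx'
        · exact le_of_not_gt hcmp
        · exact hQ' _ hx'
      | cons p P'' =>
        have h1 : a = p ∧ T' = P'' ++ mt :: Q' := by
          simpa using hdec
        obtain ⟨rfl, hT'eq⟩ := h1
        refine ⟨a :: g :: P'', mt, Q', by simp [hT'eq], by rw [hmejor, ← hmt], ?_, hQ'⟩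
        intro x hx
        have hamem : a ∈ a :: P'' := List.mem_cons_self
        have hka : mt.1.2 ^ 2 < a.1.2 ^ 2 := hP' _ hamem
        rcases List.mem_cons.mp hx with rfl | hx'
        · exact hka
        · rcases List.mem_cons.mp hx' with rfl | hx''
          · exact lt_of_lt_of_le hka (le_of_not_gt hcmp)
          · exact hP' _ (List.mem_cons_of_mem _ hx'')

theorem pv_minU {TT S : List ((List String × Int) × Int)} (hperm : S.Perm TT)
    (hS : S.Pairwise pvLexLe) (hT : TT.Pairwise pvTagLt)
    {P Q : List ((List String × Int) × Int)} {mt : (List String × Int) × Int}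
    (hdec : TT = P ++ mt :: Q)
    (hP : ∀ x ∈ P, mt.1.2 ^ 2 < x.1.2 ^ 2) (hQ : ∀ x ∈ Q, mt.1.2 ^ 2 ≤ x.1.2 ^ 2) :
    ∃ S', S = mt :: S' ∧ S'.Perm (P ++ Q) := by
  have hmtTT : mt ∈ TT := by rw [hdec]; exact List.mem_append.mpr (Or.inr List.mem_cons_self)
  have hne : S ≠ [] := by
    intro h
    rw [h] at hperm
    have := hperm.symm.eq_nil
    rw [hdec] at this
    simp at this
  obtain ⟨s0, S', rfl⟩ := List.exists_cons_of_ne_nil hne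
  rcases List.pairwise_cons.mp hS with ⟨hs0, hS'⟩
  have hmtmin : ∀ x ∈ TT, pvLexLe mt x := by
    intro x hx
    rw [hdec] at hx
    rcases List.mem_append.mp hx with h1 | h1
    · exact Or.inl (hP _ h1)
    · rcases List.mem_cons.mp h1 with rfl | h1
      · exact Or.inr ⟨rfl, le_refl _⟩
      · rcases lt_or_eq_of_le (hQ _ h1) with h2 | h2
        · exact Or.inl h2
        · refine Or.inr ⟨h2, le_of_lt ?_⟩
          have := (List.pairwise_append.mp (hdec ▸ hT)).2.1
          exact List.pairwise_cons.mp this |>.1 _ h1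
  have hs0mem : s0 ∈ TT := hperm.mem_iff.mp List.mem_cons_self
  have h2 : pvLexLe mt s0 := hmtmin s0 hs0mem
  have heq : s0 = mt := by
    rcases List.mem_cons.mp (hperm.mem_iff.mpr hmtTT) with h | h
    · exact h.symm
    · have h1 : pvLexLe s0 mt := hs0 _ h
      rcases h1 with hl1 | ⟨he1, ht1⟩ <;> rcases h2 with hl2 | ⟨he2, ht2⟩
      · exact absurd hl2 (lt_asymm hl1)
      · exact absurd he2.symm (ne_of_lt hl1)
      · exact absurd he1 (ne_of_gt hl2)
      · exact pv_tag_inj hT hs0mem hmtTT (le_antisymm ht1 ht2)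
  subst heq
  refine ⟨S', rfl, ?_⟩
  have hp2 : (s0 :: S').Perm (s0 :: (P ++ Q)) := by
    refine hperm.trans ?_
    rw [hdec]
    exact List.perm_middle
  exact hp2.cons_inv

theorem pv_erase {P Q : List ((List String × Int) × Int)} {mt : (List String × Int) × Int}
    (hP : ∀ x ∈ P, mt.1.2 ^ 2 < x.1.2 ^ 2) :
    ((P ++ mt :: Q).map Prod.fst).erase mt.1 = (P ++ Q).map Prod.fst := by
  have hnot : mt.1 ∉ P.map Prod.fst := by
    intro hmem
    rcases List.mem_map.mp hmem with ⟨x, hx, hfst⟩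
    have := hP x hx
    rw [hfst] at this
    omega
  rw [List.map_append, List.map_cons, List.erase_append_right _ hnot, List.erase_cons_head,
    ← List.map_append]

theorem pv_tw_not {α : Type} (l : List α) (p : α → Bool)
    (h : (l.takeWhile p).length < l.length) : p (l[(l.takeWhile p).length]) = false := by
  induction l with
  | nil => simp at h
  | cons x t ih =>
    by_cases hp : p x
    · simp only [List.takeWhile_cons, hp, if_true, List.length_cons, List.getElem_cons_succ]
      exact ih (by simpa [List.takeWhile_cons, hp] using h)
    · simp only [List.takeWhile_cons, hp, if_false, List.length_nil, List.getElem_cons_zero]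
      simpa using hp

theorem pv_tw_get {α : Type} (l : List α) (p : α → Bool) {i : Nat}
    (hi : i < (l.takeWhile p).length) (h : i < l.length) : p l[i] = true := by
  have hpref : l.takeWhile p <+: l := List.takeWhile_prefix p
  have heq : (l.takeWhile p)[i] = l[i] := hpref.getElem hi
  rw [← heq]
  exact List.mem_takeWhile_imp (List.getElem_mem hi)

theorem pv_mono {α : Type} (l : List α) (f : α → Int) (hs : (l.map f).Pairwise (· ≤ ·))
    {i j : Nat} (hij : i ≤ j) (hj : j < l.length) : f l[i] ≤ f l[j] := by
  rcases Nat.eq_or_lt_of_le hij with rfl | hlt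
  · exact le_refl _
  · have h2 := List.pairwise_iff_getElem.mp hs i j
      (by simpa using lt_of_le_of_lt hij hj) (by simpa using hj) hlt
    simpa using h2

theorem pv_bs (l : List (List String × Int)) (vm : Int)
    (hs : (l.map (fun g => g.2 ^ 2)).Pairwise (· ≤ ·)) :
    ∀ n izq der : Nat, der - izq ≤ n →
      izq ≤ (l.takeWhile (fun g => decide (g.2 ^ 2 < vm))).length →
      (l.takeWhile (fun g => decide (g.2 ^ 2 < vm))).length ≤ der → der ≤ l.length →
      pvBusquedaBinaria l vm izq der = (l.takeWhile (fun g => decide (g.2 ^ 2 < vm))).length := by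
  intro n
  induction n with
  | zero =>
    intro izq der h0 h1 h2 h3
    unfold pvBusquedaBinaria
    rw [dif_neg (by omega)]
    omega
  | succ n ih =>
    intro izq der h0 h1 h2 h3
    unfold pvBusquedaBinaria
    by_cases hc : izq < der
    · rw [dif_pos hc]
      have hmlen : (izq + der) / 2 < l.length := by omega
      have hget : PySem.List.pyGetD l (((izq + der) / 2 : Nat) : Int) ([], 0)
          = l[(izq + der) / 2] := by
        rw [PySem.List.pyGetD_natCast]
        exact List.getD_eq_getElem l _ hmlen
      simp only [hget, pvValorCuadrado]
      by_cases hlt : (l[(izq + der) / 2].2 : Int) ^ 2 < vm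
      · rw [if_pos hlt]
        have hmid : (izq + der) / 2 < (l.takeWhile (fun g => decide (g.2 ^ 2 < vm))).length := by
          by_contra htw
          push_neg at htw
          have h4 : (l.takeWhile (fun g => decide (g.2 ^ 2 < vm))).length < l.length := by omega
          have h5 := pv_tw_not l (fun g => decide (g.2 ^ 2 < vm)) h4
          have h6 := pv_mono l (fun g => g.2 ^ 2) hs htw hmlen
          simp only [decide_eq_false_iff_not] at h5
          exact h5 (by omega)
        exact ih ((izq + der) / 2 + 1) der (by omega) (by omega) h2 h3
      · rw [if_neg hlt]
        have hmid : (l.takeWhile (fun g => decide (g.2 ^ 2 < vm))).length ≤ (izq + der) / 2 := by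
          by_contra htw
          push_neg at htw
          have h5 := pv_tw_get l (fun g => decide (g.2 ^ 2 < vm)) htw hmlen
          simp only [decide_eq_true_eq] at h5
          exact hlt h5
        exact ih izq ((izq + der) / 2) (by omega) h1 hmid (by omega)
    · rw [dif_neg hc]
      omega

theorem pv_insert_sorted_new {S' : List ((List String × Int) × Int)}
    (hS : S'.Pairwise pvLexLe) (w : (List String × Int) × Int)
    (htag : ∀ x ∈ S', w.2 < x.2) :
    (S'.take ((S'.map Prod.fst).takeWhile (fun g => decide (g.2 ^ 2 < w.1.2 ^ 2))).length
      ++ w :: S'.drop ((S'.map Prod.fst).takeWhile (fun g => decide (g.2 ^ 2 < w.1.2 ^ 2))).length).Pairwise pvLexLe := by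
  have hmapsorted : ((S'.map Prod.fst).map (fun g => g.2 ^ 2)).Pairwise (· ≤ ·) := by
    rw [List.pairwise_map, List.pairwise_map]
    refine hS.imp ?_
    intro a b hab
    rcases hab with h | ⟨h, _⟩
    · exact le_of_lt h
    · exact le_of_eq h
  have htake : ∀ x ∈ S'.take ((S'.map Prod.fst).takeWhile
      (fun g => decide (g.2 ^ 2 < w.1.2 ^ 2))).length, x.1.2 ^ 2 < w.1.2 ^ 2 := by
    intro x hx
    have h1 : (S'.map Prod.fst).take ((S'.map Prod.fst).takeWhile
        (fun g => decide (g.2 ^ 2 < w.1.2 ^ 2))).length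
        = (S'.map Prod.fst).takeWhile (fun g => decide (g.2 ^ 2 < w.1.2 ^ 2)) :=
      (List.prefix_iff_eq_take.mp (List.takeWhile_prefix _)).symm
    have hx1 : x.1 ∈ (S'.map Prod.fst).takeWhile (fun g => decide (g.2 ^ 2 < w.1.2 ^ 2)) := by
      rw [← h1, ← List.map_take]
      exact List.mem_map_of_mem hx
    have := List.mem_takeWhile_imp hx1
    simpa using this
  have hdrop : ∀ y ∈ S'.drop ((S'.map Prod.fst).takeWhile
      (fun g => decide (g.2 ^ 2 < w.1.2 ^ 2))).length, w.1.2 ^ 2 ≤ y.1.2 ^ 2 := by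
    intro y hy
    rw [List.mem_iff_getElem] at hy
    obtain ⟨i, hilen, hyeq⟩ := hy
    rw [List.length_drop] at hilen
    have hpi : ((S'.map Prod.fst).takeWhile (fun g => decide (g.2 ^ 2 < w.1.2 ^ 2))).length
        + i < S'.length := by omega
    have hyeq2 : y = S'[((S'.map Prod.fst).takeWhile
        (fun g => decide (g.2 ^ 2 < w.1.2 ^ 2))).length + i]'hpi := by
      rw [← hyeq, List.getElem_drop]
    have hplen : ((S'.map Prod.fst).takeWhile
        (fun g => decide (g.2 ^ 2 < w.1.2 ^ 2))).length < (S'.map Prod.fst).length := by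
      rw [List.length_map]; omega
    have hpim : ((S'.map Prod.fst).takeWhile
        (fun g => decide (g.2 ^ 2 < w.1.2 ^ 2))).length + i < (S'.map Prod.fst).length := by
      rw [List.length_map]; omega
    have h5 := pv_tw_not (S'.map Prod.fst) (fun g => decide (g.2 ^ 2 < w.1.2 ^ 2)) hplen
    have h6 := pv_mono (S'.map Prod.fst) (fun g => g.2 ^ 2) hmapsorted
      (Nat.le_add_right _ i) hpim
    simp only [List.getElem_map, decide_eq_false_iff_not, not_lt] at h5 h6
    rw [hyeq2]
    exact le_trans h5 h6
  rw [List.pairwise_append]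
  refine ⟨hS.sublist (List.take_sublist _ _), ?_, ?_⟩
  · rw [List.pairwise_cons]
    constructor
    · intro y hy
      rcases lt_or_eq_of_le (hdrop y hy) with h | h
      · exact Or.inl h
      · exact Or.inr ⟨h, le_of_lt (htag y (List.mem_of_mem_drop hy))⟩
    · exact hS.sublist (List.drop_sublist _ _)
  · intro x hx y hy
    rcases List.mem_cons.mp hy with rfl | hy'
    · exact Or.inl (htake x hx)
    · exact Or.inl (lt_of_lt_of_le (htake x hx) (hdrop y hy'))

theorem pv_insertBy_eq {α : Type} (l : List α) (x : α) (before : α → α → Bool) :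
    PySem.List.insertBy before x l =
      l.takeWhile (fun y => !before x y) ++ x :: l.dropWhile (fun y => !before x y) := by
  induction l with
  | nil => simp [PySem.List.insertBy]
  | cons y t ih =>
    by_cases hb : before x y
    · simp [PySem.List.insertBy, hb]
    · simp [PySem.List.insertBy, hb, ih]

theorem pv_insert_sorted_old {W₀ : List ((List String × Int) × Int)}
    (hS : W₀.Pairwise pvLexLe) (z : (List String × Int) × Int)
    (htag : ∀ x ∈ W₀, x.2 < z.2) :
    (W₀.take ((W₀.map Prod.fst).takeWhile (fun g => !decide (z.1.2 ^ 2 < g.2 ^ 2))).length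
      ++ z :: W₀.drop ((W₀.map Prod.fst).takeWhile (fun g => !decide (z.1.2 ^ 2 < g.2 ^ 2))).length).Pairwise pvLexLe := by
  have hmapsorted : ((W₀.map Prod.fst).map (fun g => g.2 ^ 2)).Pairwise (· ≤ ·) := by
    rw [List.pairwise_map, List.pairwise_map]
    refine hS.imp ?_
    intro a b hab
    rcases hab with h | ⟨h, _⟩
    · exact le_of_lt h
    · exact le_of_eq h
  have htake : ∀ x ∈ W₀.take ((W₀.map Prod.fst).takeWhile
      (fun g => !decide (z.1.2 ^ 2 < g.2 ^ 2))).length, x.1.2 ^ 2 ≤ z.1.2 ^ 2 := by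
    intro x hx
    have h1 : (W₀.map Prod.fst).take ((W₀.map Prod.fst).takeWhile
        (fun g => !decide (z.1.2 ^ 2 < g.2 ^ 2))).length
        = (W₀.map Prod.fst).takeWhile (fun g => !decide (z.1.2 ^ 2 < g.2 ^ 2)) :=
      (List.prefix_iff_eq_take.mp (List.takeWhile_prefix _)).symm
    have hx1 : x.1 ∈ (W₀.map Prod.fst).takeWhile (fun g => !decide (z.1.2 ^ 2 < g.2 ^ 2)) := by
      rw [← h1, ← List.map_take]
      exact List.mem_map_of_mem hx
    have := List.mem_takeWhile_imp hx1
    simp only [Bool.not_eq_eq_eq_not, Bool.not_true, decide_eq_false_iff_not, not_lt] at this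
    exact this
  have hdrop : ∀ y ∈ W₀.drop ((W₀.map Prod.fst).takeWhile
      (fun g => !decide (z.1.2 ^ 2 < g.2 ^ 2))).length, z.1.2 ^ 2 < y.1.2 ^ 2 := by
    intro y hy
    rw [List.mem_iff_getElem] at hy
    obtain ⟨i, hilen, hyeq⟩ := hy
    rw [List.length_drop] at hilen
    have hpi : ((W₀.map Prod.fst).takeWhile (fun g => !decide (z.1.2 ^ 2 < g.2 ^ 2))).length
        + i < W₀.length := by omega
    have hyeq2 : y = W₀[((W₀.map Prod.fst).takeWhile
        (fun g => !decide (z.1.2 ^ 2 < g.2 ^ 2))).length + i]'hpi := by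
      rw [← hyeq, List.getElem_drop]
    have hplen : ((W₀.map Prod.fst).takeWhile
        (fun g => !decide (z.1.2 ^ 2 < g.2 ^ 2))).length < (W₀.map Prod.fst).length := by
      rw [List.length_map]; omega
    have hpim : ((W₀.map Prod.fst).takeWhile
        (fun g => !decide (z.1.2 ^ 2 < g.2 ^ 2))).length + i < (W₀.map Prod.fst).length := by
      rw [List.length_map]; omega
    have h5 := pv_tw_not (W₀.map Prod.fst) (fun g => !decide (z.1.2 ^ 2 < g.2 ^ 2)) hplen
    have h6 := pv_mono (W₀.map Prod.fst) (fun g => g.2 ^ 2) hmapsorted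
      (Nat.le_add_right _ i) hpim
    simp only [List.getElem_map, Bool.not_eq_false', decide_eq_true_eq] at h5 h6
    rw [hyeq2]
    exact lt_of_lt_of_le h5 h6
  rw [List.pairwise_append]
  refine ⟨hS.sublist (List.take_sublist _ _), ?_, ?_⟩
  · rw [List.pairwise_cons]
    constructor
    · intro y hy
      exact Or.inl (hdrop y hy)
    · exact hS.sublist (List.drop_sublist _ _)
  · intro x hx y hy
    rcases List.mem_cons.mp hy with rfl | hy'
    · rcases lt_or_eq_of_le (htake x hx) with h | h
      · exact Or.inl h
      · exact Or.inr ⟨h, le_of_lt (htag x (List.mem_of_mem_take hx))⟩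
    · exact Or.inl (lt_of_le_of_lt (htake x hx) (hdrop y hy'))

theorem pv_dropWhile_eq_drop {α : Type} (l : List α) (p : α → Bool) :
    l.dropWhile p = l.drop (l.takeWhile p).length := by
  induction l with
  | nil => rfl
  | cons x t ih =>
    by_cases hp : p x
    · simp [List.dropWhile_cons, List.takeWhile_cons, hp, ih]
    · simp [List.dropWhile_cons, List.takeWhile_cons, hp]

theorem pv_map_insert (W₀ : List ((List String × Int) × Int)) (z : (List String × Int) × Int)
    (n : Nat) :
    (W₀.map Prod.fst).take n ++ z.1 :: (W₀.map Prod.fst).drop n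
      = (W₀.take n ++ z :: W₀.drop n).map Prod.fst := by
  simp [List.map_take, List.map_drop]

theorem pv_FS (T : List ((List String × Int) × Int)) (hT : T.Pairwise pvTagLt) :
    ∃ W : List ((List String × Int) × Int), W.Perm T ∧ W.Pairwise pvLexLe ∧
      (T.map Prod.fst).foldl
        (fun acc x => PySem.List.insertBy (fun a b => decide (a.2 ^ 2 < b.2 ^ 2)) x acc) []
        = W.map Prod.fst := by
  induction T using List.reverseRecOn with
  | nil => exact ⟨[], List.Perm.refl _, List.Pairwise.nil, rfl⟩
  | append_singleton T₀ z ih =>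
    rcases List.pairwise_append.mp hT with ⟨hpw0, _, hcross⟩
    have htagz : ∀ x ∈ T₀, x.2 < z.2 := fun x hx => hcross x hx z List.mem_cons_self
    rcases ih hpw0 with ⟨W₀, hWperm, hWpw, hfold⟩
    have htagW : ∀ x ∈ W₀, x.2 < z.2 := fun x hx => htagz x (hWperm.mem_iff.mp hx)
    refine ⟨W₀.take ((W₀.map Prod.fst).takeWhile
        (fun g => !decide (z.1.2 ^ 2 < g.2 ^ 2))).length
      ++ z :: W₀.drop ((W₀.map Prod.fst).takeWhile
        (fun g => !decide (z.1.2 ^ 2 < g.2 ^ 2))).length, ?_, ?_, ?_⟩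
    · refine List.Perm.trans List.perm_middle ?_
      rw [List.take_append_drop]
      have h9 : (z :: T₀).Perm (T₀ ++ [z]) := by
        simpa using (List.perm_middle (a := z) (l₁ := T₀) (l₂ := ([] : List _))).symm
      exact (hWperm.cons z).trans h9
    · exact pv_insert_sorted_old hWpw z htagW
    · rw [List.map_append, List.foldl_append, hfold]
      simp only [List.map_cons, List.map_nil, List.foldl_cons, List.foldl_nil]
      rw [pv_insertBy_eq]
      have hsplit : (W₀.map Prod.fst).takeWhile
          (fun y => !decide (z.1.2 ^ 2 < y.2 ^ 2))
          = (W₀.map Prod.fst).take ((W₀.map Prod.fst).takeWhile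
            (fun g => !decide (z.1.2 ^ 2 < g.2 ^ 2))).length :=
        List.prefix_iff_eq_take.mp (List.takeWhile_prefix _)
      have hdsplit : (W₀.map Prod.fst).dropWhile
          (fun y => !decide (z.1.2 ^ 2 < y.2 ^ 2))
          = (W₀.map Prod.fst).drop ((W₀.map Prod.fst).takeWhile
            (fun g => !decide (z.1.2 ^ 2 < g.2 ^ 2))).length :=
        pv_dropWhile_eq_drop _ _
      rw [← pv_map_insert, ← hsplit, ← hdsplit]

theorem pv_step (A B : List (List String × Int)) (m : String × Int) (h : pvInv A B) :
    (pvPasoA (some A) m = none ∧ pvPasoB (some B) m = none) ∨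
    (∃ A' B', pvPasoA (some A) m = some A' ∧ pvPasoB (some B) m = some B' ∧ pvInv A' B') := by
  obtain ⟨T, S, hB, hA, hperm, hS, hT⟩ := h
  cases T with
  | nil =>
    have hSe : S = [] := hperm.eq_nil
    have hBe : B = [] := by simp [hB]
    have hAe : A = [] := by simp [hA, hSe]
    subst hBe; subst hAe
    exact Or.inl ⟨rfl, rfl⟩
  | cons t0 T2 =>
    right
    rcases pv_fm T2 t0 hT with ⟨P, mt, Q, hdec, hmt, hP, hQ⟩
    rcases pv_minU hperm hS hT hdec hP hQ with ⟨S', hSeq, hS'perm⟩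
    have hA' : A = mt.1 :: S'.map Prod.fst := by rw [hA, hSeq, List.map_cons]
    have hB' : B = t0.1 :: T2.map Prod.fst := by rw [hB, List.map_cons]
    have hmtmemB : mt.1 ∈ B := by
      rw [hB, hdec]
      exact List.mem_map_of_mem (List.mem_append.mpr (Or.inr List.mem_cons_self))
    have herase : B.erase mt.1 = (P ++ Q).map Prod.fst := by
      rw [hB, hdec]
      exact pv_erase hP
    have hpB : pvPasoB (some B) m
        = some ((mt.1.1 ++ [m.1], mt.1.2 + m.2) :: (P ++ Q).map Prod.fst) := by
      rw [hB']
      show pvPasoB (some (t0.1 :: T2.map Prod.fst)) m = _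
      simp only [pvPasoB]
      have hsl : PySem.List.slice (t0.1 :: T2.map Prod.fst) (some 1) none
          = T2.map Prod.fst := by
        rw [PySem.List.slice_from_one]
        rfl
      rw [hsl, ← hmt, ← hB']
      rw [PySem.List.remove?_eq_some_erase B mt.1 hmtmemB, herase]
    have hS'pw : S'.Pairwise pvLexLe := by
      rw [hSeq] at hS
      exact (List.pairwise_cons.mp hS).2
    have hsorted : ((S'.map Prod.fst).map (fun g => g.2 ^ 2)).Pairwise (· ≤ ·) := by
      rw [List.pairwise_map, List.pairwise_map]
      refine hS'pw.imp ?_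
      intro a b hab
      rcases hab with h | ⟨h, _⟩
      · exact le_of_lt h
      · exact le_of_eq h
    have htwle : ((S'.map Prod.fst).takeWhile
        (fun g => decide (g.2 ^ 2 < (mt.1.2 + m.2) ^ 2))).length ≤ (S'.map Prod.fst).length :=
      (List.takeWhile_prefix _).length_le
    have hlen : (S'.map Prod.fst).length = S'.length := List.length_map _
    have hbus : pvBusquedaBinaria (S'.map Prod.fst)
        (pvValorCuadrado (mt.1.1 ++ [m.1], mt.1.2 + m.2)) 0 (S'.map Prod.fst).length
        = ((S'.map Prod.fst).takeWhile
          (fun g => decide (g.2 ^ 2 < (mt.1.2 + m.2) ^ 2))).length := by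
      have := pv_bs (S'.map Prod.fst) ((mt.1.2 + m.2) ^ 2) hsorted (S'.map Prod.fst).length
        0 (S'.map Prod.fst).length (by omega) (by omega) htwle (le_refl _)
      simpa [pvValorCuadrado] using this
    have hins : pvInsertarOrdenado (S'.map Prod.fst) (mt.1.1 ++ [m.1], mt.1.2 + m.2)
        = (S'.map Prod.fst).take ((S'.map Prod.fst).takeWhile
            (fun g => decide (g.2 ^ 2 < (mt.1.2 + m.2) ^ 2))).length
          ++ (mt.1.1 ++ [m.1], mt.1.2 + m.2) :: (S'.map Prod.fst).drop
            ((S'.map Prod.fst).takeWhile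
            (fun g => decide (g.2 ^ 2 < (mt.1.2 + m.2) ^ 2))).length := by
      unfold pvInsertarOrdenado
      rw [hbus, PySem.List.insert_natCast _ _ _ (by omega)]
    have hpA : pvPasoA (some A) m
        = some (pvInsertarOrdenado (S'.map Prod.fst) (mt.1.1 ++ [m.1], mt.1.2 + m.2)) := by
      rw [hA']
      rfl
    have hmin : ∀ x ∈ t0 :: T2, t0.2 ≤ x.2 := by
      intro x hx
      rcases List.mem_cons.mp hx with rfl | hx'
      · exact le_refl _
      · exact le_of_lt ((List.pairwise_cons.mp hT).1 x hx')
    have htagS' : ∀ x ∈ S', t0.2 - 1 < x.2 := by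
      intro x hx
      have hx2 : x ∈ P ++ Q := hS'perm.mem_iff.mp hx
      have hx3 : x ∈ t0 :: T2 := by
        rw [hdec]
        rcases List.mem_append.mp hx2 with h | h
        · exact List.mem_append.mpr (Or.inl h)
        · exact List.mem_append.mpr (Or.inr (List.mem_cons_of_mem mt h))
      have := hmin x hx3
      omega
    refine ⟨_, _, hpA, hpB,
      ⟨((mt.1.1 ++ [m.1], mt.1.2 + m.2), t0.2 - 1) :: (P ++ Q),
       S'.take ((S'.map Prod.fst).takeWhile
          (fun g => decide (g.2 ^ 2 < (mt.1.2 + m.2) ^ 2))).length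
        ++ ((mt.1.1 ++ [m.1], mt.1.2 + m.2), t0.2 - 1) :: S'.drop
          ((S'.map Prod.fst).takeWhile
          (fun g => decide (g.2 ^ 2 < (mt.1.2 + m.2) ^ 2))).length, ?_, ?_, ?_, ?_, ?_⟩⟩
    · simp
    · rw [hins]
      simp [List.map_append, List.map_take, List.map_drop]
    · refine List.Perm.trans List.perm_middle ?_
      rw [List.take_append_drop]
      exact hS'perm.cons _
    · exact pv_insert_sorted_new hS'pw (((mt.1.1 ++ [m.1], mt.1.2 + m.2), t0.2 - 1)) htagS'
    · rw [List.pairwise_cons]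
      constructor
      · intro x hx
        show (t0.2 - 1 : Int) < x.2
        have hx3 : x ∈ t0 :: T2 := by
          rw [hdec]
          rcases List.mem_append.mp hx with h | h
          · exact List.mem_append.mpr (Or.inl h)
          · exact List.mem_append.mpr (Or.inr (List.mem_cons_of_mem mt h))
        have := hmin x hx3
        omega
      · refine List.Pairwise.sublist ?_ (hdec ▸ hT)
        exact (List.sublist_cons_self mt Q).append_left P

theorem pv_foldA_none (L : List (String × Int)) : L.foldl pvPasoA none = none := by
  induction L with
  | nil => rfl
  | cons m L ih => exact ih

theorem pv_foldB_none (L : List (String × Int)) : L.foldl pvPasoB none = none := by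
  induction L with
  | nil => rfl
  | cons m L ih => exact ih

theorem pv_sim (L : List (String × Int)) :
    ∀ A B, pvInv A B →
    (L.foldl pvPasoA (some A) = none ∧ L.foldl pvPasoB (some B) = none) ∨
    (∃ A' B', L.foldl pvPasoA (some A) = some A' ∧ L.foldl pvPasoB (some B) = some B' ∧
      pvInv A' B') := by
  induction L with
  | nil => intro A B h; exact Or.inr ⟨A, B, rfl, rfl, h⟩
  | cons m L ih =>
    intro A B h
    rcases pv_step A B m h with ⟨ha, hb⟩ | ⟨A', B', ha, hb, hinv⟩
    · left
      simp [List.foldl_cons, ha, hb, pv_foldA_none, pv_foldB_none]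
    · simpa only [List.foldl_cons, ha, hb] using ih A' B' hinv

theorem pv_final {A B : List (List String × Int)} (h : pvInv A B) :
    PySem.List.sorted B (fun g => g.2 ^ 2) false = A := by
  obtain ⟨T, S, hB, hA, hperm, hS, hT⟩ := h
  rw [hB, hA, PySem.List.sorted_eq_foldl_insertBy]
  rcases pv_FS T hT with ⟨W, hWperm, hWpw, hfold⟩
  rw [hfold]
  congr 1
  refine List.eq_of_perm_of_sorted ?_ hWpw hS (hWperm.trans hperm.symm)
  intro a b haW hbS hab hba
  have haT : a ∈ T := hWperm.mem_iff.mp haW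
  have hbT : b ∈ T := hperm.mem_iff.mp hbS
  rcases hab with hl1 | ⟨he1, ht1⟩ <;> rcases hba with hl2 | ⟨he2, ht2⟩
  · exact absurd hl2 (lt_asymm hl1)
  · exact absurd he2.symm (ne_of_lt hl1)
  · exact absurd he1 (ne_of_gt hl2)
  · exact pv_tag_inj hT haT hbT (le_antisymm ht1 ht2)

-- ===== VERDICT (by name: the statement is the Claim_ definition above) =====
theorem p_opt_tribu_agua_gd_spec : Claim_equal_p_opt_tribu_agua_gd := by
  intro maestros habilidades k _ _
  unfold Spec_p_opt_tribu_agua_gd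
  unfold p_opt_tribu_agua_gd p_opt_tribu_agua_gd_alt
  have hinv : pvInv ((PySem.List.pyRange 0 k 1).map (fun _ => ([], 0)))
      ((PySem.List.pyRange 0 k 1).map (fun _ => ([], 0))) := by
    refine ⟨(PySem.List.pyRange 0 k 1).map (fun i => ((([] : List String), (0 : Int)), i)),
      (PySem.List.pyRange 0 k 1).map (fun i => ((([] : List String), (0 : Int)), i)),
      ?_, ?_, List.Perm.refl _, ?_, ?_⟩
    · simp [List.map_map]
    · simp [List.map_map]
    · refine List.pairwise_map.mpr ?_
      exact (PySem.List.pairwise_lt_pyRange_one 0 k).imp (fun h => Or.inr ⟨rfl, le_of_lt h⟩)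
    · refine List.pairwise_map.mpr ?_
      exact (PySem.List.pairwise_lt_pyRange_one 0 k).imp (fun h => h)
  rcases pv_sim (PySem.List.sorted (List.zip maestros habilidades) (fun x => x.2) true) _ _ hinv
    with ⟨ha, hb⟩ | ⟨A', B', ha, hb, hinv'⟩
  · simp only [ha, hb]
  · simp only [ha, hb, pv_final hinv']
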